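-- pv_equiv track=rewrite | github.com/alexandrebouayad/google-kick-start | 2021/round-a/l-shaped-plots/solution.py | segments
-- ===== SOURCE A (Python) =====
-- def segments(grid, left=True):
--     grid = grid if left else [lst[::-1] for lst in grid]
--     segments = []
--     for row in grid:
--         lst = []
--         count = 0
--         for x in row:
--             count = count + 1 if x else 0
--             lst.append(count)
--         segments.append(lst)
--     segments = segments if left else [lst[::-1] for lst in segments]
--     return segments
-- ===== SOURCE B (Python) =====
-- def segments(grid, left=True):
--     out = []
--     for row in grid:
--         seg = []
--         i, n = 0, len(row)
--         while i < n:
--             b = bool(row[i])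
--             j = i
--             while j < n and bool(row[j]) == b:
--                 j += 1
--             L = j - i
--             if not b:
--                 seg.extend([0] * L)
--             elif left:
--                 seg.extend(range(1, L + 1))
--             else:
--                 seg.extend(range(L, 0, -1))
--             i = j
--         out.append(seg)
--     return out
-- ===== Notes on version B (the rewrite author's own statement) =====
-- stated objective: alternative
-- what changed: B splits each row into maximal truthy/falsy runs first and emits each run's counts in one shot ([0]*L, 1..L, or L..1), instead of A's cell-by-cell running counter combined with reversing the whole grid and all result rows for left=False.
import Mathlib
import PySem

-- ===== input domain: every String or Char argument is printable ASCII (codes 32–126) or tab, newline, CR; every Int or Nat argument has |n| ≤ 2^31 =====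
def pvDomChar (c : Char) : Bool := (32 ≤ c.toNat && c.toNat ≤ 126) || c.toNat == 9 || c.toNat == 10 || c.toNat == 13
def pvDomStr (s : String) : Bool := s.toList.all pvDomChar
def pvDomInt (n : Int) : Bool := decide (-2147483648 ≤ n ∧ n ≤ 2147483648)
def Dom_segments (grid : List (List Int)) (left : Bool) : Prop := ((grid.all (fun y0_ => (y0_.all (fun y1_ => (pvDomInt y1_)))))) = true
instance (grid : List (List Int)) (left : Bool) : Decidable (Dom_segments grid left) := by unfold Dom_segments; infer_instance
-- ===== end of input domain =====

-- B groups each row into maximal truthy/falsy runs and emits each run's counts directly,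
-- replacing A's running-counter scan plus whole-grid double reversal (alternative decomposition, same cost).


-- ===== PORT A =====
-- inner loop: count = count + 1 if x else 0; lst.append(count)
def segRowA (row : List Int) : List Int :=
  (row.foldl (fun (p : List Int × Int) x =>
      let c := if x ≠ 0 then p.2 + 1 else 0
      (p.1 ++ [c], c)) ([], 0)).1

def segments (grid : List (List Int)) (left : Bool) : List (List Int) :=
  -- lst[::-1] is List.reverse (full-slice with step -1)
  let grid' := if left then grid else grid.map (fun lst => lst.reverse)
  let segs := grid'.foldl (fun acc row => acc ++ [segRowA row]) []
  if left then segs else segs.map (fun lst => lst.reverse)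

-- ===== PORT B =====
-- maximal runs of equal truthiness, left to right (B's inner while-scan per run)
def segRuns (l : List Int) : List (Bool × Nat) :=
  match l with
  | [] => []
  | x :: xs =>
    let b := decide (x ≠ 0)
    let pre := xs.takeWhile (fun y => decide (y ≠ 0) == b)
    let rest := xs.dropWhile (fun y => decide (y ≠ 0) == b)
    (b, pre.length + 1) :: segRuns rest
termination_by l.length
decreasing_by
  simp only [List.length_cons]
  exact Nat.lt_succ_of_le (List.length_dropWhile_le _ _)

-- [0]*L / range(1,L+1) / range(L,0,-1)
def segFill (left : Bool) (r : Bool × Nat) : List Int :=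
  if r.1 then
    if left then (List.range r.2).map (fun (i : Nat) => (i : Int) + 1)
    else (List.range r.2).map (fun (i : Nat) => (r.2 : Int) - (i : Int))
  else List.replicate r.2 0

def segments_alt (grid : List (List Int)) (left : Bool) : List (List Int) :=
  grid.map (fun row => (segRuns row).flatMap (segFill left))

-- ===== PRECONDITION & SPEC =====
def Spec_segments (grid : List (List Int)) (left : Bool) (out : List (List Int)) : Prop := out = segments_alt grid left
instance (grid : List (List Int)) (left : Bool) (out : List (List Int)) : Decidable (Spec_segments grid left out) := by unfold Spec_segments; infer_instance

-- ===== CLAIM (what is proved, stated in full; the proofs are below) =====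
def Claim_equal_segments : Prop := ∀ (grid : List (List Int)) (left : Bool), Dom_segments grid left → Spec_segments grid left (segments grid left)

-- ===== LEMMAS AND PROOFS =====
def cstep (c : Int) (x : Int) : Int := if x ≠ 0 then c + 1 else 0

def countUp (c : Int) : List Int → List Int
  | [] => []
  | x :: xs => cstep c x :: countUp (cstep c x) xs

theorem segRowA_eq_countUp_aux (row : List Int) : ∀ (acc : List Int) (c : Int),
    (row.foldl (fun (p : List Int × Int) x =>
      let c := if x ≠ 0 then p.2 + 1 else 0
      (p.1 ++ [c], c)) (acc, c)).1 = acc ++ countUp c row := by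
  induction row with
  | nil => intro acc c; simp [countUp]
  | cons x xs ih =>
    intro acc c
    simp only [List.foldl_cons, countUp, cstep]
    rw [ih]
    simp

theorem segRowA_eq_countUp (row : List Int) : segRowA row = countUp 0 row := by
  rw [segRowA, segRowA_eq_countUp_aux row [] 0, List.nil_append]

theorem foldl_append_map (grid : List (List Int)) (f : List Int → List Int) :
    ∀ acc, grid.foldl (fun acc row => acc ++ [f row]) acc = acc ++ grid.map f := by
  induction grid with
  | nil => intro acc; simp
  | cons r g ih => intro acc; simp [List.foldl_cons, ih]

theorem countUp_append (c : Int) (u v : List Int) :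
    countUp c (u ++ v) = countUp c u ++ countUp (u.foldl cstep c) v := by
  induction u generalizing c with
  | nil => simp [countUp]
  | cons x xs ih => simp [countUp, ih]

theorem countUp_zero (c : Int) (u : List Int) (h : ∀ x ∈ u, x = 0) :
    countUp c u = List.replicate u.length 0 := by
  induction u generalizing c with
  | nil => simp [countUp]
  | cons x xs ih =>
    have hx : x = 0 := h x (by simp)
    simp [countUp, cstep, hx, ih _ (fun y hy => h y (by simp [hy])), List.replicate_succ]

theorem foldl_cstep_zero (c : Int) (u : List Int) (hne : u ≠ []) (h : ∀ x ∈ u, x = 0) :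
    u.foldl cstep c = 0 := by
  induction u generalizing c with
  | nil => exact absurd rfl hne
  | cons x xs ih =>
    have hx : x = 0 := h x (by simp)
    cases xs with
    | nil => simp [cstep, hx]
    | cons y ys =>
      simp only [List.foldl_cons]
      exact ih _ (by simp) (fun z hz => h z (by simp [hz]))

theorem countUp_truthy (u : List Int) (h : ∀ x ∈ u, x ≠ 0) :
    ∀ c, countUp c u = (List.range u.length).map (fun (i : Nat) => c + (i : Int) + 1) := by
  induction u with
  | nil => intro c; simp [countUp]
  | cons x xs ih =>
    intro c
    have hx : x ≠ 0 := h x (by simp)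
    have hrec := ih (fun y hy => h y (by simp [hy])) (c + 1)
    simp only [countUp, cstep, hx, List.length_cons, List.range_succ_eq_map,
      List.map_cons, List.map_map, hrec, ne_eq, not_false_eq_true, if_true]
    refine List.cons_eq_cons.mpr ⟨by push_cast; ring, List.map_congr_left fun i _ => ?_⟩
    simp only [Function.comp]
    push_cast; ring

theorem foldl_cstep_truthy (u : List Int) (h : ∀ x ∈ u, x ≠ 0) :
    ∀ c, u.foldl cstep c = c + u.length := by
  induction u with
  | nil => intro c; simp
  | cons x xs ih =>
    intro c
    have hx : x ≠ 0 := h x (by simp)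
    simp only [List.foldl_cons, cstep, hx, if_pos, List.length_cons,
      ih (fun y hy => h y (by simp [hy])) (c + 1), ne_eq, not_false_eq_true]
    push_cast; ring

theorem countUp_reset (c : Int) (rest : List Int)
    (h : rest = [] ∨ ∃ t, rest = 0 :: t) : countUp c rest = countUp 0 rest := by
  rcases h with h | ⟨t, h⟩ <;> subst h <;> simp [countUp, cstep]

-- reverse of an ascending fill is the descending fill
theorem reverse_asc (c : Int) : ∀ (L : Nat),
    ((List.range L).map (fun (i : Nat) => c + (i : Int) + 1)).reverse
      = (List.range L).map (fun (i : Nat) => c + (L : Int) - (i : Int)) := by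
  intro L
  induction L with
  | zero => simp
  | succ n ih =>
    have hR : (List.range (n+1)).map (fun (i : Nat) => c + ((n+1 : Nat) : Int) - (i : Int))
        = (c + (n : Int) + 1) :: (List.range n).map (fun (i : Nat) => c + (n : Int) - (i : Int)) := by
      rw [List.range_succ_eq_map, List.map_cons, List.map_map]
      refine List.cons_eq_cons.mpr ⟨by push_cast; ring, List.map_congr_left fun i _ => ?_⟩
      simp only [Function.comp]
      push_cast; ring
    rw [hR, List.range_succ, List.map_append, List.reverse_append, ih]
    simp

-- decompose a row as its first maximal run plus the remainder
theorem run_facts (x : Int) (xs : List Int) :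
    let b := decide (x ≠ 0)
    let pre := xs.takeWhile (fun y => decide (y ≠ 0) == b)
    let rest := xs.dropWhile (fun y => decide (y ≠ 0) == b)
    xs = pre ++ rest ∧ (∀ y ∈ x :: pre, decide (y ≠ 0) = b) ∧
      (rest = [] ∨ ∃ h t, rest = h :: t ∧ decide (h ≠ 0) = !b) := by
  refine ⟨(List.takeWhile_append_dropWhile).symm, ?_, ?_⟩
  · intro y hy
    rcases List.mem_cons.mp hy with h | h
    · subst h; rfl
    · have := List.mem_takeWhile_imp h
      simpa using this
  · cases hrest : xs.dropWhile (fun y => decide (y ≠ 0) == decide (x ≠ 0)) with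
    | nil => exact Or.inl rfl
    | cons h t =>
      refine Or.inr ⟨h, t, rfl, ?_⟩
      have := List.head?_dropWhile_not (fun y => decide (y ≠ 0) == decide (x ≠ 0)) xs
      rw [hrest] at this
      simp only [List.head?_cons] at this
      cases hb : decide (h ≠ 0) <;> cases hx : decide (x ≠ 0) <;> simp_all

theorem seg_asc : ∀ (n : Nat) (row : List Int), row.length ≤ n →
    countUp 0 row = (segRuns row).flatMap (segFill true) := by
  intro n
  induction n with
  | zero =>
    intro row h
    have hnil : row = [] := List.eq_nil_of_length_eq_zero (Nat.le_zero.mp h)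
    subst hnil; simp [countUp, segRuns]
  | succ n ih =>
    intro row hlen
    cases row with
    | nil => simp [countUp, segRuns]
    | cons x xs =>
      obtain ⟨hsplit, hrun, hrest⟩ := run_facts x xs
      set b := decide (x ≠ 0) with hb
      set pre := xs.takeWhile (fun y => decide (y ≠ 0) == b) with hpre
      set rest := xs.dropWhile (fun y => decide (y ≠ 0) == b) with hrestdef
      have hrestlen : rest.length ≤ n := by
        have h1 : pre.length + rest.length = xs.length := by
          rw [hsplit]; simp
        simp only [List.length_cons] at hlen
        omega
      have hIH := ih rest hrestlen
      rw [segRuns]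
      simp only [← hb, ← hpre, ← hrestdef]
      have hxr : (x :: xs) = (x :: pre) ++ rest := by simp [hsplit]
      rw [hxr, countUp_append]
      rw [List.flatMap_cons, ← hIH]
      cases hbv : b with
      | true =>
        have htr : ∀ y ∈ x :: pre, y ≠ 0 := by
          intro y hy
          have := hrun y hy; rw [hbv] at this; simpa using this
        have hrest0 : rest = [] ∨ ∃ t, rest = 0 :: t := by
          rcases hrest with h | ⟨h, t, ht, hh⟩
          · exact Or.inl h
          · right
            rw [hbv] at hh; simp at hh
            exact ⟨t, by rw [ht, hh]⟩
        rw [countUp_truthy _ htr, foldl_cstep_truthy _ htr, countUp_reset _ _ hrest0]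
        simp [segFill]
      | false =>
        have hz : ∀ y ∈ x :: pre, y = 0 := by
          intro y hy
          have := hrun y hy; rw [hbv] at this; simpa using this
        rw [countUp_zero _ _ hz, foldl_cstep_zero _ _ (by simp) hz]
        simp [segFill]

theorem seg_desc : ∀ (n : Nat) (row : List Int), row.length ≤ n →
    (countUp 0 row.reverse).reverse = (segRuns row).flatMap (segFill false) := by
  intro n
  induction n with
  | zero =>
    intro row h
    have hnil : row = [] := List.eq_nil_of_length_eq_zero (Nat.le_zero.mp h)
    subst hnil; simp [countUp, segRuns]
  | succ n ih =>
    intro row hlen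
    cases row with
    | nil => simp [countUp, segRuns]
    | cons x xs =>
      obtain ⟨hsplit, hrun, hrest⟩ := run_facts x xs
      set b := decide (x ≠ 0) with hb
      set pre := xs.takeWhile (fun y => decide (y ≠ 0) == b) with hpre
      set rest := xs.dropWhile (fun y => decide (y ≠ 0) == b) with hrestdef
      have hrestlen : rest.length ≤ n := by
        have h1 : pre.length + rest.length = xs.length := by
          rw [hsplit]; simp
        simp only [List.length_cons] at hlen
        omega
      have hIH := ih rest hrestlen
      rw [segRuns]
      simp only [← hb, ← hpre, ← hrestdef]
      have hxr : (x :: xs).reverse = rest.reverse ++ (x :: pre).reverse := by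
        simp [hsplit]
      rw [hxr, countUp_append, List.reverse_append, List.flatMap_cons, ← hIH]
      have hrunrev : ∀ y ∈ (x :: pre).reverse, decide (y ≠ 0) = b := by
        intro y hy; exact hrun y (List.mem_reverse.mp hy)
      cases hbv : b with
      | true =>
        have htr : ∀ y ∈ (x :: pre).reverse, y ≠ 0 := by
          intro y hy
          have := hrunrev y hy; rw [hbv] at this; simpa using this
        have hc' : rest.reverse.foldl cstep 0 = 0 := by
          rcases hrest with h | ⟨h, t, ht, hh⟩
          · simp [h]
          · rw [hbv] at hh; simp at hh
            rw [ht, hh]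
            simp only [List.reverse_cons]
            rw [List.foldl_append]
            simp [cstep]
        rw [hc', countUp_truthy _ htr, reverse_asc]
        simp [segFill]
      | false =>
        have hz : ∀ y ∈ (x :: pre).reverse, y = 0 := by
          intro y hy
          have := hrunrev y hy; rw [hbv] at this; simpa using this
        rw [countUp_zero _ _ hz]
        simp [segFill, List.reverse_replicate]

-- ===== VERDICT (by name: the statement is the Claim_ definition above) =====
theorem segments_spec : Claim_equal_segments := by
  intro grid left _
  unfold Spec_segments segments segments_alt
  cases left with
  | true =>
    simp only [if_true]
    rw [foldl_append_map grid segRowA []]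
    simp only [List.nil_append]
    apply List.map_congr_left
    intro row _
    rw [segRowA_eq_countUp]
    exact seg_asc row.length row le_rfl
  | false =>
    simp only [if_neg (by simp : ¬ (false = true))]
    rw [foldl_append_map _ segRowA []]
    simp only [List.nil_append, List.map_map]
    apply List.map_congr_left
    intro row _
    simp only [Function.comp]
    rw [segRowA_eq_countUp]
    exact seg_desc row.length row le_rfl
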